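-- pv_equiv track=rewrite | github.com/Dzedza/competition | upm_mood.py | calc
-- ===== SOURCE A (Python) =====
-- def calc(msg):
--     score=0
--     j=1
--     while j<len(msg):
--         if msg[j-1]==":" and msg[j]==")":
--             k=j
--             while msg[k]==")":
--                 score+=1
--                 k+=1
--                 if k>=len(msg):
--                     break
--             j=k
--         elif msg[j-1]==":" and msg[j]=="(":
--             k=j
--             while msg[k]=="(":
--                 score-=1
--                 k+=1
--                 if k>=len(msg):
--                     break
--             j=k
--         else:
--             j+=1
--     return score
-- ===== SOURCE B (Python) =====
-- def calc(msg):
--     # One-pass scan: carry the previous character and the sign of the current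
--     # counted smiley/frowny run; add the sign for every character.
--     score = 0
--     prev = ''
--     sign = 0
--     for ch in msg:
--         if prev == ':' and ch == ')':
--             sign = 1
--         elif prev == ':' and ch == '(':
--             sign = -1
--         elif ch != prev:
--             sign = 0
--         score += sign
--         prev = ch
--     return score
-- ===== Notes on version B (the rewrite author's own statement) =====
-- stated objective: simpler
-- what changed: Replaces A's nested-while state machine with index jumping and per-position lookbehind indexing by a single one-pass fold over the characters that carries only (previous char, sign of the current counted run) and adds the sign at every character.
import Mathlib
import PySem

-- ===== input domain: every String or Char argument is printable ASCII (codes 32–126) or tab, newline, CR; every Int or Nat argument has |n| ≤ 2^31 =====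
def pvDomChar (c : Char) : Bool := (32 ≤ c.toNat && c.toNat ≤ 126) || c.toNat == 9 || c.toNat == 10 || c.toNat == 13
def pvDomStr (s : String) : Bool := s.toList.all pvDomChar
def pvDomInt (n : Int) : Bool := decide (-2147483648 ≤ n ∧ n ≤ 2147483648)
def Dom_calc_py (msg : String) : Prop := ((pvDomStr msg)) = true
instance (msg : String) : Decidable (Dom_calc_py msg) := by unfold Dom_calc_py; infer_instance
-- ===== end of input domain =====

-- B replaces A's nested-while index-jumping state machine by a single one-pass
-- fold over the characters carrying (previous char, sign of the current run); objective: simpler.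


-- ===== PORT A =====
-- inner `while msg[k]==c: score+=sg; k+=1; if k>=len: break` loop of A.
-- Python checks the character first and the bound after the increment; the loop is only
-- entered with k < len, so checking the bound first is the same computation.  The `fuel`
-- counter (called with fuel = len(msg), more than the loop can iterate) and the bound
-- check are totality guards only; they never change the computed value.
def pvInnerA : Char → List Char → Int → Nat → Int → Nat → Int × Nat
  | _, _, _, 0, s, k => (s, k)
  | c, l, sg, fuel + 1, s, k =>
    if k < l.length then
      if l.getD k ' ' == c then
        pvInnerA c l sg fuel (s + sg) (k + 1)
      else (s, k)
    else (s, k)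

-- outer `while j<len(msg)` loop of A (all indices are nonnegative and in range, so
-- List.getD is exact; fuel = len(msg) again exceeds the possible iteration count)
def pvOuterA : List Char → Nat → Int → Nat → Int
  | _, 0, s, _ => s
  | l, fuel + 1, s, j =>
    if j < l.length then
      if h1 : (l.getD (j-1) ' ' == ':' && l.getD j ' ' == ')') = true then
        let r := pvInnerA ')' l 1 l.length s j
        pvOuterA l fuel r.1 r.2
      else if h2 : (l.getD (j-1) ' ' == ':' && l.getD j ' ' == '(') = true then
        let r := pvInnerA '(' l (-1) l.length s j
        pvOuterA l fuel r.1 r.2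
      else pvOuterA l fuel s (j + 1)
    else s

def calc_py (msg : String) : Int := pvOuterA msg.toList msg.toList.length 0 1

-- ===== PORT B =====
-- state = (prev, sign, score); Python's initial prev = '' (a string equal to no
-- single character) is modelled as `none`.
def pvStepB (st : Option Char × Int × Int) (ch : Char) : Option Char × Int × Int :=
  let sg :=
    if st.1 == some ':' && ch == ')' then 1
    else if st.1 == some ':' && ch == '(' then -1
    else if some ch == st.1 then st.2.1
    else 0
  (some ch, sg, st.2.2 + sg)

def calc_py_alt (msg : String) : Int :=
  (msg.toList.foldl pvStepB (none, 0, 0)).2.2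

-- ===== PRECONDITION & SPEC =====
def Spec_calc_py (msg : String) (out : Int) : Prop := out = calc_py_alt msg
instance (msg : String) (out : Int) : Decidable (Spec_calc_py msg out) := by unfold Spec_calc_py; infer_instance

-- ===== CLAIM (what is proved, stated in full; the proofs are below) =====
def Claim_equal_calc_py : Prop := ∀ (msg : String), Dom_calc_py msg → Spec_calc_py msg (calc_py msg)

-- ===== LEMMAS AND PROOFS =====

-- length of the run of copies of c starting at index k
def pvRunLen (c : Char) (l : List Char) (k : Nat) : Nat :=
  if k < l.length then
    if l.getD k ' ' == c then pvRunLen c l (k + 1) + 1 else 0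
  else 0
termination_by l.length - k

theorem pvInnerA_eq (c : Char) (l : List Char) (sg : Int) :
    ∀ fuel s k, l.length ≤ k + fuel →
      pvInnerA c l sg fuel s k = (s + sg * pvRunLen c l k, k + pvRunLen c l k) := by
  intro fuel
  induction fuel with
  | zero =>
    intro s k hf
    rw [pvInnerA]
    conv_rhs => rw [pvRunLen]
    rw [if_neg (by omega : ¬ k < l.length)]
    simp
  | succ f ih =>
    intro s k hf
    rw [pvInnerA]
    by_cases hk : k < l.length
    · by_cases hc : (l.getD k ' ' == c) = true
      · rw [if_pos hk, if_pos hc, ih _ _ (by omega)]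
        conv_rhs => rw [pvRunLen]
        rw [if_pos hk, if_pos hc, Prod.mk.injEq]
        constructor
        · push_cast; ring
        · omega
      · rw [if_pos hk, if_neg hc]
        conv_rhs => rw [pvRunLen]
        rw [if_pos hk, if_neg hc]
        simp
    · rw [if_neg hk]
      conv_rhs => rw [pvRunLen]
      rw [if_neg hk]
      simp

theorem pvRunLen_le (c : Char) (l : List Char) (k : Nat) (h : k ≤ l.length) :
    k + pvRunLen c l k ≤ l.length := by
  fun_induction pvRunLen c l k with
  | case1 k h1 h2 ih => have := ih (by omega); omega
  | case2 k h1 h2 => omega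
  | case3 k h1 => omega

theorem pvRunLen_chars (c : Char) (l : List Char) (k : Nat) :
    ∀ i < pvRunLen c l k, l.getD (k + i) ' ' = c := by
  fun_induction pvRunLen c l k with
  | case1 k h1 h2 ih =>
    intro i hi
    cases i with
    | zero => simpa using h2
    | succ n =>
      have := ih n (by omega)
      rwa [show k + 1 + n = k + (n + 1) from by omega] at this
  | case2 k h1 h2 => intro i hi; omega
  | case3 k h1 => intro i hi; omega

theorem pvRunLen_max (c : Char) (l : List Char) (k : Nat)
    (h : k + pvRunLen c l k < l.length) :
    l.getD (k + pvRunLen c l k) ' ' ≠ c := by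
  fun_induction pvRunLen c l k with
  | case1 k h1 h2 ih =>
    have h' : k + 1 + pvRunLen c l (k + 1) < l.length := by omega
    have := ih h'
    rwa [show k + 1 + pvRunLen c l (k + 1) = k + (pvRunLen c l (k + 1) + 1) from by omega] at this
  | case2 k h1 h2 => simpa using h2
  | case3 k h1 => omega

theorem pvRunLen_pos (c : Char) (l : List Char) (k : Nat)
    (h1 : k < l.length) (h2 : l.getD k ' ' = c) :
    1 ≤ pvRunLen c l k := by
  rw [pvRunLen, if_pos h1, if_pos (by rw [h2]; exact beq_self_eq_true c)]
  omega

-- folding pvStepB over m further characters of the run (all equal to c ≠ ':', prev already c)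
theorem pvFoldRun (c : Char) (l : List Char) (hc : c ≠ ':') (sg : Int) :
    ∀ m k s, (∀ i < m, l.getD (k + i) ' ' = c) → k + m ≤ l.length →
    (l.drop k).foldl pvStepB (some c, sg, s) =
      (l.drop (k + m)).foldl pvStepB (some c, sg, s + sg * m) := by
  intro m
  induction m with
  | zero => intro k s _ _; simp
  | succ n ih =>
    intro k s hch hle
    have hk : k < l.length := by omega
    have hdrop : l.drop k = l[k] :: l.drop (k + 1) := List.drop_eq_getElem_cons hk
    have hck : l.getD k ' ' = c := by simpa using hch 0 (by omega)
    have hck' : l[k] = c := by rwa [List.getD_eq_getElem l ' ' hk] at hck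
    have hcf : (some c == some ':') = false := by simp [hc]
    have hstep : pvStepB (some c, sg, s) l[k] = (some c, sg, s + sg) := by
      rw [hck']
      simp [pvStepB, hcf]
    rw [hdrop, List.foldl_cons, hstep]
    have hrec := ih (k + 1) (s + sg)
      (fun i hi => by
        have := hch (i + 1) (by omega)
        rwa [show k + (i + 1) = k + 1 + i from by omega] at this)
      (by omega)
    rw [hrec, show k + 1 + n = k + (n + 1) from by omega]
    have : s + sg + sg * (n : Int) = s + sg * ((n : Nat) + 1 : Nat) := by push_cast; ring
    rw [this]

-- main correspondence: folding B's step over the suffix from j, with prev = msg[j-1],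
-- equals A's outer loop started at j
theorem pvMain (l : List Char) :
    ∀ fuel j sg s, l.length ≤ j + fuel → 1 ≤ j →
    (sg = 0 ∨ ((l.getD (j-1) ' ' = ')' ∨ l.getD (j-1) ' ' = '(') ∧
       (l.length ≤ j ∨ l.getD j ' ' ≠ l.getD (j-1) ' '))) →
    ((l.drop j).foldl pvStepB (some (l.getD (j-1) ' '), sg, s)).2.2 = pvOuterA l fuel s j := by
  intro fuel
  induction fuel with
  | zero =>
    intro j sg s hf hj _
    rw [pvOuterA, List.drop_eq_nil_of_le (by omega : l.length ≤ j)]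
    rfl
  | succ f ih =>
    intro j sg s hf hj hsg
    by_cases hjl : j < l.length
    · have hdrop : l.drop j = l[j] :: l.drop (j + 1) := List.drop_eq_getElem_cons hjl
      have hgj : l.getD j ' ' = l[j] := List.getD_eq_getElem l ' ' hjl
      by_cases hc1 : l.getD (j-1) ' ' = ':' ∧ l.getD j ' ' = ')'
      · -- a smiley run begins at j
        have hcond : (l.getD (j-1) ' ' == ':' && l.getD j ' ' == ')') = true := by
          rw [hc1.1, hc1.2]; rfl
        rw [pvOuterA, if_pos hjl, dif_pos hcond]
        rw [pvInnerA_eq ')' l 1 l.length s j (by omega)]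
        set n := pvRunLen ')' l j with hn_def
        have hn : 1 ≤ n := pvRunLen_pos ')' l j hjl hc1.2
        have hnle : j + n ≤ l.length := pvRunLen_le ')' l j (Nat.le_of_lt hjl)
        have hjc : l[j] = ')' := by rw [← hgj]; exact hc1.2
        have hstep : pvStepB (some ':', sg, s) ')' = (some ')', 1, s + 1) := by
          simp [pvStepB]
        rw [hc1.1, hdrop, List.foldl_cons, hjc, hstep]
        have hrun := pvFoldRun ')' l (by decide) 1 (n - 1) (j + 1) (s + 1)
          (fun i hi => by
            have := pvRunLen_chars ')' l j (i + 1) (by omega)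
            rwa [show j + (i + 1) = j + 1 + i from by omega] at this)
          (by omega)
        rw [hrun, show j + 1 + (n - 1) = j + n from by omega]
        have hacc : s + 1 + 1 * ((n - 1 : Nat) : Int) = s + 1 * (n : Int) := by
          have : ((n - 1 : Nat) : Int) = (n : Int) - 1 := by omega
          rw [this]; ring
        rw [hacc]
        have hlast : l.getD (j + n - 1) ' ' = ')' := by
          have := pvRunLen_chars ')' l j (n - 1) (by omega)
          rwa [show j + (n - 1) = j + n - 1 from by omega] at this
        have hnext : l.length ≤ j + n ∨ l.getD (j + n) ' ' ≠ l.getD (j + n - 1) ' ' := by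
          by_cases hend : l.length ≤ j + n
          · exact Or.inl hend
          · refine Or.inr ?_
            rw [hlast]
            exact pvRunLen_max ')' l j (by omega)
        have := ih (j + n) 1 (s + 1 * (n : Int)) (by omega) (by omega)
          (Or.inr ⟨Or.inl hlast, hnext⟩)
        rw [hlast] at this
        exact this
      · by_cases hc2 : l.getD (j-1) ' ' = ':' ∧ l.getD j ' ' = '('
        · -- a frowny run begins at j
          have hcond1 : ¬ ((l.getD (j-1) ' ' == ':' && l.getD j ' ' == ')') = true) := by
            simp only [Bool.and_eq_true, beq_iff_eq]
            exact hc1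
          have hcond : (l.getD (j-1) ' ' == ':' && l.getD j ' ' == '(') = true := by
            rw [hc2.1, hc2.2]; rfl
          rw [pvOuterA, if_pos hjl, dif_neg hcond1, dif_pos hcond]
          rw [pvInnerA_eq '(' l (-1) l.length s j (by omega)]
          set n := pvRunLen '(' l j with hn_def
          have hn : 1 ≤ n := pvRunLen_pos '(' l j hjl hc2.2
          have hnle : j + n ≤ l.length := pvRunLen_le '(' l j (Nat.le_of_lt hjl)
          have hjc : l[j] = '(' := by rw [← hgj]; exact hc2.2
          have hstep : pvStepB (some ':', sg, s) '(' = (some '(', -1, s + -1) := by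
            simp [pvStepB]
          rw [hc2.1, hdrop, List.foldl_cons, hjc, hstep]
          have hrun := pvFoldRun '(' l (by decide) (-1) (n - 1) (j + 1) (s + -1)
            (fun i hi => by
              have := pvRunLen_chars '(' l j (i + 1) (by omega)
              rwa [show j + (i + 1) = j + 1 + i from by omega] at this)
            (by omega)
          rw [hrun, show j + 1 + (n - 1) = j + n from by omega]
          have hacc : s + -1 + -1 * ((n - 1 : Nat) : Int) = s + -1 * (n : Int) := by
            have : ((n - 1 : Nat) : Int) = (n : Int) - 1 := by omega
            rw [this]; ring
          rw [hacc]
          have hlast : l.getD (j + n - 1) ' ' = '(' := by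
            have := pvRunLen_chars '(' l j (n - 1) (by omega)
            rwa [show j + (n - 1) = j + n - 1 from by omega] at this
          have hnext : l.length ≤ j + n ∨ l.getD (j + n) ' ' ≠ l.getD (j + n - 1) ' ' := by
            by_cases hend : l.length ≤ j + n
            · exact Or.inl hend
            · refine Or.inr ?_
              rw [hlast]
              exact pvRunLen_max '(' l j (by omega)
          have := ih (j + n) (-1) (s + -1 * (n : Int)) (by omega) (by omega)
            (Or.inr ⟨Or.inr hlast, hnext⟩)
          rw [hlast] at this
          exact this
        · -- no counted run begins at j: one step with sign 0
          have hcond1 : ¬ ((l.getD (j-1) ' ' == ':' && l.getD j ' ' == ')') = true) := by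
            simp only [Bool.and_eq_true, beq_iff_eq]; exact hc1
          have hcond2 : ¬ ((l.getD (j-1) ' ' == ':' && l.getD j ' ' == '(') = true) := by
            simp only [Bool.and_eq_true, beq_iff_eq]; exact hc2
          rw [pvOuterA, if_pos hjl, dif_neg hcond1, dif_neg hcond2]
          have hsg0 : l[j] = l.getD (j-1) ' ' → sg = 0 := by
            intro heq
            rcases hsg with h | ⟨_, hlen | hne⟩
            · exact h
            · omega
            · exact absurd (hgj.trans heq) hne
          have hzero :
              (if (some (l.getD (j-1) ' ') == some ':' && l[j] == ')') = true then (1 : Int)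
               else if (some (l.getD (j-1) ' ') == some ':' && l[j] == '(') = true then -1
               else if (some l[j] == some (l.getD (j-1) ' ')) = true then sg
               else 0) = 0 := by
            split_ifs with hA hB hC
            · simp only [Bool.and_eq_true, beq_iff_eq, Option.some.injEq] at hA
              exact absurd ⟨hA.1, hgj.trans hA.2⟩ hc1
            · simp only [Bool.and_eq_true, beq_iff_eq, Option.some.injEq] at hB
              exact absurd ⟨hB.1, hgj.trans hB.2⟩ hc2
            · simp only [beq_iff_eq, Option.some.injEq] at hC
              exact hsg0 hC
            · rfl
          have hstep : pvStepB (some (l.getD (j-1) ' '), sg, s) l[j] = (some l[j], 0, s) := by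
            simp only [pvStepB, hzero]
            simp
          rw [hdrop, List.foldl_cons, hstep]
          have := ih (j + 1) 0 s (by omega) (by omega) (Or.inl rfl)
          rw [Nat.add_sub_cancel, hgj] at this
          exact this
    · rw [pvOuterA, if_neg hjl, List.drop_eq_nil_of_le (by omega : l.length ≤ j)]
      rfl

-- ===== VERDICT (by name: the statement is the Claim_ definition above) =====
theorem calc_py_spec : Claim_equal_calc_py := by
  intro msg _
  show calc_py msg = calc_py_alt msg
  unfold calc_py calc_py_alt
  cases hl : msg.toList with
  | nil => rfl
  | cons c t =>
    have hfirst : pvStepB (none, 0, 0) c = (some c, 0, 0) := by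
      simp [pvStepB]
    rw [List.foldl_cons, hfirst]
    have hmain := pvMain (c :: t) (c :: t).length 1 0 0 (by omega) (by omega) (Or.inl rfl)
    simpa using hmain.symm
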